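-- pv_equiv track=rewrite | github.com/marluca95/NGS_pipeline | src/ngs_qc/UMI-consensus.py | collapse_umis
-- ===== SOURCE A (Python) =====
-- from collections import defaultdict, Counter
--
-- def collapse_umis(reads_per_umi):
--     """Return consensus sequence using majority rule."""
--     if not reads_per_umi:
--         return ""
--     read_length = len(reads_per_umi[0])
--     consensus_seq = []
--     for i in range(read_length):
--         bases = [read[i] for read in reads_per_umi if len(read) > i]
--         if not bases:
--             consensus_seq.append("N")
--             continue
--         most_common_base, _ = Counter(bases).most_common(1)[0]
--         consensus_seq.append(most_common_base)
--     return "".join(consensus_seq)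
-- ===== SOURCE B (Python) =====
-- from collections import Counter
--
-- def collapse_umis(reads_per_umi):
--     """Return consensus sequence using majority rule (row-major tally table)."""
--     if not reads_per_umi:
--         return ""
--     read_length = len(reads_per_umi[0])
--     counters = [Counter() for _ in range(read_length)]
--     for read in reads_per_umi:
--         for i in range(min(len(read), read_length)):
--             counters[i][read[i]] += 1
--     return "".join(c.most_common(1)[0][0] if c else "N" for c in counters)
-- ===== Notes on version B (the rewrite author's own statement) =====
-- stated objective: alternative
-- what changed: Replaces A's column-major scheme (for each position, re-scan all reads to collect a bases list and build a fresh Counter) with a single row-major pass over the reads maintaining a table of per-position Counters, then reads the consensus off the table.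
import Mathlib
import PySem

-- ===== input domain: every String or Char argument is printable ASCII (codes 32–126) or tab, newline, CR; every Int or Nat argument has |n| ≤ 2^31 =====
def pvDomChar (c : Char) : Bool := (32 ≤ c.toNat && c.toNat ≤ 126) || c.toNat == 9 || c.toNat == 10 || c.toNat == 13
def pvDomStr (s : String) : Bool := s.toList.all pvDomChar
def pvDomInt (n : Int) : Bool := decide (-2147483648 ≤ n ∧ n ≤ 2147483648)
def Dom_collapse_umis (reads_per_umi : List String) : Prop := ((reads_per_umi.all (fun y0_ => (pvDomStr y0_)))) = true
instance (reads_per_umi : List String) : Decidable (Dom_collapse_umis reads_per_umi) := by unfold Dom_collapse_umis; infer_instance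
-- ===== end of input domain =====

-- B replaces A's column-major scans (one pass over all reads per position) by one row-major
-- pass maintaining a per-position tally table; objective: alternative decomposition.

-- Counter(xs).most_common(1)[0][0]: stable sort of the counter's items by count, descending,
-- then the first key.  The [] branch is unreachable in both ports (callers guard nonempty).
def pvMostCommonKey (d : PySem.Dict Char Int) : Char :=
  match PySem.List.sorted d.items (fun p => p.2) true with
  | [] => 'N'
  | p :: _ => p.1

-- ===== PORT A =====
def collapse_umis (reads_per_umi : List String) : String :=
  match reads_per_umi with
  | [] => ""
  | r0 :: _ =>
    let read_length : Int := PySem.Str.len r0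
    let consensus_seq : List Char :=
      (PySem.List.pyRange 0 read_length).foldl (fun acc i =>
        -- bases = [read[i] for read in reads_per_umi if len(read) > i]; the guard makes pyGet? a some
        let bases : List Char := reads_per_umi.filterMap (fun read =>
          if i < PySem.Str.len read then PySem.Str.pyGet? read i else none)
        if bases = [] then acc ++ ['N']
        else acc ++ [pvMostCommonKey (PySem.Dict.counter bases)]) []
    String.ofList consensus_seq

-- ===== PORT B =====
def collapse_umis_alt (reads_per_umi : List String) : String :=
  match reads_per_umi with
  | [] => ""
  | r0 :: _ =>
    let read_length : Int := PySem.Str.len r0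
    let counters0 : List (PySem.Dict Char Int) :=
      (PySem.List.pyRange 0 read_length).map (fun _ => PySem.Dict.empty)
    let counters := reads_per_umi.foldl (fun t read =>
      (PySem.List.pyRange 0 (min (PySem.Str.len read) read_length)).foldl (fun t i =>
        -- counters[i][read[i]] += 1 ; i is a nonnegative in-range index here
        t.set i.toNat ((t.getD i.toNat PySem.Dict.empty).modify
          ((PySem.Str.pyGet? read i).getD 'N') 0 (· + 1))) t) counters0
    String.ofList (counters.map (fun c => if c.items = [] then 'N' else pvMostCommonKey c))

-- ===== PRECONDITION & SPEC =====
def Spec_collapse_umis (reads_per_umi : List String) (out : String) : Prop := out = collapse_umis_alt reads_per_umi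
instance (reads_per_umi : List String) (out : String) : Decidable (Spec_collapse_umis reads_per_umi out) := by unfold Spec_collapse_umis; infer_instance

-- ===== CLAIM (what is proved, stated in full; the proofs are below) =====
def Claim_equal_collapse_umis : Prop := ∀ (reads_per_umi : List String), Dom_collapse_umis reads_per_umi → Spec_collapse_umis reads_per_umi (collapse_umis reads_per_umi)

-- ===== LEMMAS AND PROOFS =====

-- the column of bases A collects at position j
def pvBases (reads : List String) (j : Nat) : List Char :=
  reads.filterMap (fun read =>
    if (j : Int) < PySem.Str.len read then PySem.Str.pyGet? read (j : Int) else none)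

def pvInc (d : PySem.Dict Char Int) (c : Char) : PySem.Dict Char Int := d.modify c 0 (· + 1)

lemma pvBases_nil (j : Nat) : pvBases [] j = [] := rfl

lemma pvBases_cons (r : String) (rs : List String) (j : Nat) :
    pvBases (r :: rs) j =
      if h : j < r.toList.length then r.toList[j] :: pvBases rs j else pvBases rs j := by
  simp only [pvBases, List.filterMap_cons, PySem.Str.len_eq, PySem.Str.pyGet?_natCast, Nat.cast_lt]
  by_cases h : j < r.toList.length
  · rw [if_pos h, dif_pos h, List.getElem?_eq_getElem h]
  · rw [if_neg h, dif_neg h]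

-- inner loop of B: writing positions 0..m-1 of the table is a mapIdx
lemma pv_inner_fold (g : Nat → PySem.Dict Char Int → PySem.Dict Char Int)
    (t : List (PySem.Dict Char Int)) (m : Nat) (hm : m ≤ t.length) :
    (List.range m).foldl (fun t j => t.set j (g j (t.getD j PySem.Dict.empty))) t
      = t.mapIdx (fun j d => if j < m then g j d else d) := by
  induction m with
  | zero =>
    refine List.ext_getElem (by simp) fun k h1 h2 => ?_
    simp [List.getElem_mapIdx]
  | succ m ih =>
    rw [List.range_succ, List.foldl_append, ih (Nat.le_of_succ_le hm)]
    simp only [List.foldl_cons, List.foldl_nil]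
    have hmlt : m < t.length := hm
    have hget : (t.mapIdx (fun j d => if j < m then g j d else d)).getD m PySem.Dict.empty
        = t[m] := by
      rw [List.getD_eq_getElem _ _ (by simpa using hmlt)]
      simp [List.getElem_mapIdx]
    refine List.ext_getElem (by simp) fun k hk hk' => ?_
    simp only [List.length_set, List.length_mapIdx] at hk hk'
    rw [List.getElem_set]
    by_cases hkm : m = k
    · subst hkm
      rw [if_pos rfl, hget]
      simp [List.getElem_mapIdx]
    · rw [if_neg hkm]
      simp only [List.getElem_mapIdx]
      split_ifs with h1 h2 <;> first | rfl | omega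

-- outer loop of B equals, position by position, folding pvInc over A's base columns
lemma pv_outer_fold (L : Int) (reads : List String) (t : List (PySem.Dict Char Int))
    (hL : (t.length : Int) = L) :
    reads.foldl (fun t read =>
      (PySem.List.pyRange 0 (min (PySem.Str.len read) L)).foldl (fun t i =>
        t.set i.toNat ((t.getD i.toNat PySem.Dict.empty).modify
          ((PySem.Str.pyGet? read i).getD 'N') 0 (· + 1))) t) t
      = t.mapIdx (fun j d => (pvBases reads j).foldl pvInc d) := by
  induction reads generalizing t with
  | nil =>
    refine List.ext_getElem (by simp) fun k h1 h2 => ?_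
    simp [List.getElem_mapIdx, pvBases_nil]
  | cons r rs ih =>
    rw [List.foldl_cons]
    have hmin : min (PySem.Str.len r) L = ((min r.toList.length t.length : Nat) : Int) := by
      rw [PySem.Str.len_eq, ← hL, Nat.cast_min]
    rw [hmin, PySem.List.pyRange_zero_natCast, List.foldl_map]
    have hfun : (fun (t : List (PySem.Dict Char Int)) (j : Nat) =>
          t.set ((j : Int)).toNat ((t.getD ((j : Int)).toNat PySem.Dict.empty).modify
            ((PySem.Str.pyGet? r (j : Int)).getD 'N') 0 (· + 1)))
        = fun t j => t.set j ((t.getD j PySem.Dict.empty).modify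
            ((PySem.Str.pyGet? r (j : Int)).getD 'N') 0 (· + 1)) := by
      funext t j
      simp
    have hinner := pv_inner_fold
      (fun j d => d.modify ((PySem.Str.pyGet? r (j : Int)).getD 'N') 0 (· + 1))
      t (min r.toList.length t.length) (Nat.min_le_right _ _)
    rw [hfun, hinner, ih _ (by rw [List.length_mapIdx, hL])]
    refine List.ext_getElem (by simp) fun k hk1 hk2 => ?_
    simp only [List.getElem_mapIdx]
    have hkt : k < t.length := by simpa using hk2
    rw [pvBases_cons]
    by_cases h : k < r.toList.length
    · rw [dif_pos h, if_pos (by omega), List.foldl_cons]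
      have : (PySem.Str.pyGet? r (k : Int)).getD 'N' = r.toList[k] := by
        rw [PySem.Str.pyGet?_natCast, List.getElem?_eq_getElem h]
        rfl
      rw [this]
      rfl
    · rw [dif_neg h, if_neg (by omega)]

-- empty-counter test in B ↔ empty-column test in A
lemma pv_items_counter_eq_nil (bs : List Char) :
    ((PySem.Dict.counter bs).items = [] ↔ bs = []) := by
  cases bs with
  | nil => simp [PySem.Dict.items_counter]
  | cons c cs =>
    simp only [PySem.Dict.items_counter]
    constructor
    · intro h
      have h2 := List.map_eq_nil_iff.mp h
      have hm : c ∈ PySem.Set.ofList (c :: cs) := by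
        rw [PySem.Set.mem_ofList]; simp
      rw [h2] at hm
      exact absurd hm (List.not_mem_nil)
    · intro h; cases h

-- A as a map over positions
lemma pv_A_eq (r0 : String) (rest : List String) :
    collapse_umis (r0 :: rest) = String.ofList ((List.range r0.toList.length).map (fun j =>
      if pvBases (r0 :: rest) j = [] then 'N'
      else pvMostCommonKey (PySem.Dict.counter (pvBases (r0 :: rest) j)))) := by
  simp only [collapse_umis]
  rw [show PySem.Str.len r0 = (r0.toList.length : Int) from PySem.Str.len_eq r0,
      PySem.List.pyRange_zero_natCast, List.foldl_map]
  congr 1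
  have hfun : (fun (acc : List Char) (j : Nat) =>
        if (r0 :: rest).filterMap (fun read =>
            if (j : Int) < PySem.Str.len read then PySem.Str.pyGet? read (j : Int) else none) = []
        then acc ++ ['N']
        else acc ++ [pvMostCommonKey (PySem.Dict.counter ((r0 :: rest).filterMap (fun read =>
            if (j : Int) < PySem.Str.len read then PySem.Str.pyGet? read (j : Int) else none)))])
      = fun acc j => acc ++ [if pvBases (r0 :: rest) j = [] then 'N'
        else pvMostCommonKey (PySem.Dict.counter (pvBases (r0 :: rest) j))] := by
    funext acc j
    show (if pvBases (r0 :: rest) j = [] then acc ++ ['N']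
        else acc ++ [pvMostCommonKey (PySem.Dict.counter (pvBases (r0 :: rest) j))]) = _
    split_ifs <;> rfl
  rw [hfun, PySem.List.foldl_append_singleton_eq_map, List.nil_append]

-- B as a map over positions
lemma pv_B_eq (r0 : String) (rest : List String) :
    collapse_umis_alt (r0 :: rest) = String.ofList ((List.range r0.toList.length).map (fun j =>
      if (PySem.Dict.counter (pvBases (r0 :: rest) j)).items = [] then 'N'
      else pvMostCommonKey (PySem.Dict.counter (pvBases (r0 :: rest) j)))) := by
  simp only [collapse_umis_alt]
  rw [show PySem.Str.len r0 = (r0.toList.length : Int) from PySem.Str.len_eq r0]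
  have houter := pv_outer_fold (r0.toList.length : Int) (r0 :: rest)
    ((PySem.List.pyRange 0 (r0.toList.length : Int)).map (fun _ => PySem.Dict.empty))
    (by rw [PySem.List.pyRange_zero_natCast]; simp)
  rw [houter]
  congr 1
  refine List.ext_getElem (by simp [PySem.List.pyRange_zero_natCast]) fun k hk1 hk2 => ?_
  simp only [List.getElem_map, List.getElem_mapIdx, List.getElem_range]
  have hcnt : (pvBases (r0 :: rest) k).foldl pvInc PySem.Dict.empty
      = PySem.Dict.counter (pvBases (r0 :: rest) k) := by
    rw [PySem.Dict.counter_eq_foldl]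
    rfl
  rw [hcnt]

-- ===== VERDICT (by name: the statement is the Claim_ definition above) =====
theorem collapse_umis_spec : Claim_equal_collapse_umis := by
  unfold Claim_equal_collapse_umis Spec_collapse_umis
  intro reads _
  cases reads with
  | nil => rfl
  | cons r0 rest =>
    rw [pv_A_eq, pv_B_eq]
    apply congrArg
    apply List.map_congr_left
    intro j _
    by_cases h : pvBases (r0 :: rest) j = []
    · rw [if_pos h, if_pos ((pv_items_counter_eq_nil _).mpr h)]
    · rw [if_neg h, if_neg (fun hc => h ((pv_items_counter_eq_nil _).mp hc))]
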